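-- pv_equiv track=rewrite | github.com/SkeletonKingCode/NLP_Assignment-1 | BSETokenizer/TokenizerCode.py | decode
-- ===== SOURCE A (Python) =====
-- def decode(encoded_sequence, vocab, merge_list):
--     """
--     Decode a list of symbols by expanding merges in the order they were learned.
--     """
--     if isinstance(encoded_sequence, str):
--         encoded_sequence = list(encoded_sequence)
--
--     sequence = encoded_sequence[:]
--     for new_token, pair in merge_list:
--         new_sequence = []
--         for symbol in sequence:
--             if symbol == new_token:
--                 new_sequence.append(pair[0])
--                 new_sequence.append(pair[1])
--             else:
--                 new_sequence.append(symbol)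
--         sequence = new_sequence
--     return sequence
-- ===== SOURCE B (Python) =====
-- def decode(encoded_sequence, vocab, merge_list):
--     """
--     Decode by precomputing each token's full expansion: process merges in
--     reverse so each new_token maps directly to its final symbol list, then
--     concatenate expansions in a single pass.
--     """
--     if isinstance(encoded_sequence, str):
--         encoded_sequence = list(encoded_sequence)
--     expand = {}
--     for new_token, pair in reversed(merge_list):
--         expand[new_token] = expand.get(pair[0], [pair[0]]) + expand.get(pair[1], [pair[1]])
--     out = []
--     for symbol in encoded_sequence:
--         out.extend(expand.get(symbol, [symbol]))
--     return out
-- ===== Notes on version B (the rewrite author's own statement) =====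
-- stated objective: faster
-- what changed: Instead of rewriting the whole sequence once per merge (M passes), B precomputes each token's full expansion in one reverse pass over the merge list and then concatenates expansions in a single pass over the sequence.
import Mathlib
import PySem

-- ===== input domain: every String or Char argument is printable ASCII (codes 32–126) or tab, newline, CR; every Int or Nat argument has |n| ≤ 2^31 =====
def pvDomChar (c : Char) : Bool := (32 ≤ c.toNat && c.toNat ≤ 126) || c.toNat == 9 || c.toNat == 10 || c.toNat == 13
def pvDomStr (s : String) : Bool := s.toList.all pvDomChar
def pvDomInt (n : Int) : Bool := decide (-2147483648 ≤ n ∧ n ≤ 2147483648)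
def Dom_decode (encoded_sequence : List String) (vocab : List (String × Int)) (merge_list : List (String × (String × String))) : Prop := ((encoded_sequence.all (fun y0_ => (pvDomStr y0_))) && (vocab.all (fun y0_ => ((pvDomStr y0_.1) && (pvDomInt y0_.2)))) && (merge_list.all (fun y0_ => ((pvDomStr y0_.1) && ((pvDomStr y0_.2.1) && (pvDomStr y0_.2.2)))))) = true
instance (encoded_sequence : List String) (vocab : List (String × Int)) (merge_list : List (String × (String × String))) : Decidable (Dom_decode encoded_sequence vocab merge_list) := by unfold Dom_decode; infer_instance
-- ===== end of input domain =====

-- B replaces A's pass-per-merge rewriting with a precomputed expansion table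
-- (one reverse pass over the merges) and a single concatenating pass.

-- ===== PORT A =====
-- one merge step: rebuild the sequence, expanding occurrences of the new token
def decode (encoded_sequence : List String) (vocab : List (String × Int)) (merge_list : List (String × (String × String))) : List String :=
  merge_list.foldl
    (fun sequence m =>
      sequence.foldl
        (fun new_sequence symbol =>
          if symbol == m.1 then new_sequence ++ [m.2.1] ++ [m.2.2]
          else new_sequence ++ [symbol])
        [])
    encoded_sequence

-- ===== PORT B =====
-- expansion table: for (new_token, pair) in reversed(merge_list): expand[new_token] = …
def decodeAltTable (merge_list : List (String × (String × String))) : PySem.Dict String (List String) :=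
  merge_list.reverse.foldl
    (fun expand m =>
      expand.insert m.1 (expand.getD m.2.1 [m.2.1] ++ expand.getD m.2.2 [m.2.2]))
    PySem.Dict.empty

def decode_alt (encoded_sequence : List String) (vocab : List (String × Int)) (merge_list : List (String × (String × String))) : List String :=
  let expand := decodeAltTable merge_list
  encoded_sequence.foldl (fun out symbol => out ++ expand.getD symbol [symbol]) []

-- ===== PRECONDITION & SPEC =====
def Spec_decode (encoded_sequence : List String) (vocab : List (String × Int)) (merge_list : List (String × (String × String))) (out : List String) : Prop := out = decode_alt encoded_sequence vocab merge_list
instance (encoded_sequence : List String) (vocab : List (String × Int)) (merge_list : List (String × (String × String))) (out : List String) : Decidable (Spec_decode encoded_sequence vocab merge_list out) := by unfold Spec_decode; infer_instance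

-- ===== CLAIM (what is proved, stated in full; the proofs are below) =====
def Claim_equal_decode : Prop := ∀ (encoded_sequence : List String) (vocab : List (String × Int)) (merge_list : List (String × (String × String))), Dom_decode encoded_sequence vocab merge_list → Spec_decode encoded_sequence vocab merge_list (decode encoded_sequence vocab merge_list)

-- ===== LEMMAS AND PROOFS =====

-- full expansion of one token under a merge list (the mathematical reference)
def expTok (merge_list : List (String × (String × String))) (t : String) : List String :=
  match merge_list with
  | [] => [t]
  | m :: rest => if t = m.1 then expTok rest m.2.1 ++ expTok rest m.2.2 else expTok rest t

-- A's inner loop is a flatMap of the one-token expansion of that single merge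
lemma decode_inner (seq : List String) (m : String × (String × String)) :
    seq.foldl
      (fun new_sequence symbol =>
        if symbol == m.1 then new_sequence ++ [m.2.1] ++ [m.2.2]
        else new_sequence ++ [symbol]) []
    = seq.flatMap (fun s => if s = m.1 then [m.2.1, m.2.2] else [s]) := by
  have h : ∀ acc : List String, seq.foldl
      (fun new_sequence symbol =>
        if symbol == m.1 then new_sequence ++ [m.2.1] ++ [m.2.2]
        else new_sequence ++ [symbol]) acc
      = acc ++ seq.flatMap (fun s => if s = m.1 then [m.2.1, m.2.2] else [s]) := by
    induction seq with
    | nil => simp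
    | cons x xs ih =>
      intro acc
      simp only [List.foldl_cons, List.flatMap_cons]
      rw [ih]
      by_cases h : x = m.1 <;> simp [h]
  simpa using h []

-- A computes the flatMap of expTok
lemma decode_eq_flatMap (seq : List String) (ml : List (String × (String × String))) :
    ml.foldl
      (fun sequence m =>
        sequence.foldl
          (fun new_sequence symbol =>
            if symbol == m.1 then new_sequence ++ [m.2.1] ++ [m.2.2]
            else new_sequence ++ [symbol]) [])
      seq
    = seq.flatMap (expTok ml) := by
  induction ml generalizing seq with
  | nil => simp [expTok]
  | cons m rest ih =>
    rw [List.foldl_cons, decode_inner seq m, ih, List.flatMap_assoc]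
    apply List.flatMap_congr
    intro t _
    by_cases h : t = m.1 <;> simp [h, expTok]

-- B's table looks up exactly expTok
lemma table_getD (ml : List (String × (String × String))) (t : String) :
    (decodeAltTable ml).getD t [t] = expTok ml t := by
  induction ml generalizing t with
  | nil => simp [decodeAltTable, PySem.Dict.getD_empty, expTok]
  | cons m rest ih =>
    have hrev : (m :: rest).reverse = rest.reverse ++ [m] := by simp
    simp only [decodeAltTable, hrev, List.foldl_append, List.foldl_cons, List.foldl_nil]
    rw [show (rest.reverse.foldl
        (fun expand m =>
          expand.insert m.1 (expand.getD m.2.1 [m.2.1] ++ expand.getD m.2.2 [m.2.2]))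
        PySem.Dict.empty) = decodeAltTable rest from rfl]
    rw [PySem.Dict.getD_insert]
    by_cases h : t = m.1 <;> simp [h, expTok, ih]

-- ===== VERDICT (by name: the statement is the Claim_ definition above) =====
theorem decode_spec : Claim_equal_decode := by
  intro es vocab ml _
  unfold Spec_decode decode decode_alt
  rw [decode_eq_flatMap]
  rw [PySem.List.foldl_append_eq_flatMap]
  simp only [table_getD, List.nil_append]
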